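-- pv_equiv track=rewrite | github.com/cloudfirst/PromAnsible | monitor/django_apscheduler/cron/ExpressionParser.py | decrease_days_of_week
-- ===== SOURCE A (Python) =====
-- def decrease_days_of_week(day_of_week_expression_part):
--     dow_chars = list(day_of_week_expression_part)
--     for i, dow_char in enumerate(dow_chars):
--         if i == 0 or dow_chars[i - 1] != '#' and dow_chars[i - 1] != '/':
--             try:
--                 char_numeric = int(dow_char)
--                 dow_chars[i] = str(char_numeric - 1)[0]
--             except ValueError:
--                 pass
--     return ''.join(dow_chars)
-- ===== SOURCE B (Python) =====
-- # B: staged passes -- first translate every digit down by one unconditionally,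
-- # then walk the original string restoring the character after each '#' or '/'.
-- _TBL = str.maketrans('0123456789', '-012345678')
--
--
-- def decrease_days_of_week(day_of_week_expression_part):
--     s = day_of_week_expression_part
--     out = list(s.translate(_TBL))
--     for i, ch in enumerate(s):
--         if ch in '#/' and i + 1 < len(s):
--             out[i + 1] = s[i + 1]
--     return ''.join(out)
-- ===== Notes on version B (the rewrite author's own statement) =====
-- stated objective: alternative
-- what changed: A's single guarded in-place pass (per-char int()/try decrement, guarded by the possibly-mutated predecessor) is replaced by two staged passes: a str.translate that decrements every digit unconditionally, then a repair loop that restores the character following each '#' or '/' from the original string.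
import Mathlib
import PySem

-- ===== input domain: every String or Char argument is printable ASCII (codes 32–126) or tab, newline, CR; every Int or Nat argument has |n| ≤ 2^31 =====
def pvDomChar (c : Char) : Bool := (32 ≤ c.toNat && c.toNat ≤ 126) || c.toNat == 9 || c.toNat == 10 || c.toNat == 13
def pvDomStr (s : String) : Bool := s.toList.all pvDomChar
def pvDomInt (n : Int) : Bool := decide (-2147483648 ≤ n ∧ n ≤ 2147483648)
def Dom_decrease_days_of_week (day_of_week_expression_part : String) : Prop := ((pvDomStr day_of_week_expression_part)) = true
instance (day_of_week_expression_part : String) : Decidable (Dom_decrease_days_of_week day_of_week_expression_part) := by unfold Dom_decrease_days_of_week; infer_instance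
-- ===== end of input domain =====

-- B replaces A's guarded in-place digit loop by two staged passes: translate every digit
-- down by one unconditionally, then restore the character after each '#'/'/' (alternative; same cost).


-- ===== PORT A =====
-- loop body of A's 'for i, dow_char in enumerate(dow_chars)' (state = the mutated list)
def pvStepA (cs : List Char) (iv : Int × Char) : List Char :=
  if iv.1 == 0 || (PySem.List.pyGetD cs (iv.1 - 1) ' ' != '#' && PySem.List.pyGetD cs (iv.1 - 1) ' ' != '/') then
    match PySem.Int.ofStr? (String.ofList [iv.2]) with
    | some char_numeric =>
        -- str(char_numeric - 1)[0]; index 0 never raises (str(n) is nonempty)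
        PySem.List.pySetD cs iv.1 (PySem.List.pyGetD (PySem.Int.toChars (char_numeric - 1)) 0 ' ')
    | none => cs   -- except ValueError: pass
  else cs

def decrease_days_of_week (day_of_week_expression_part : String) : String :=
  let dow_chars := day_of_week_expression_part.toList
  String.ofList ((PySem.List.enumerate dow_chars).foldl pvStepA dow_chars)

-- ===== PORT B =====
-- Source B's translation table _TBL = str.maketrans('0123456789', '-012345678')
def pvTbl : PySem.Dict Char Char :=
  PySem.Dict.ofList [('0','-'),('1','0'),('2','1'),('3','2'),('4','3'),('5','4'),('6','5'),('7','6'),('8','7'),('9','8')]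

-- repair-loop body of Source B: "if ch in '#/' and i+1 < len(s): out[i+1] = s[i+1]"
def pvStepB (cs : List Char) (out : List Char) (iv : Int × Char) : List Char :=
  if (iv.2 == '#' || iv.2 == '/') && decide (iv.1 + 1 < (cs.length : Int)) then
    PySem.List.pySetD out (iv.1 + 1) (PySem.List.pyGetD cs (iv.1 + 1) ' ')
  else out

def decrease_days_of_week_alt (day_of_week_expression_part : String) : String :=
  let cs := day_of_week_expression_part.toList
  let out := cs.map (fun c => pvTbl.getD c c)        -- s.translate(_TBL)
  String.ofList ((PySem.List.enumerate cs).foldl (pvStepB cs) out)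

-- ===== PRECONDITION & SPEC =====
def Spec_decrease_days_of_week (day_of_week_expression_part : String) (out : String) : Prop := out = decrease_days_of_week_alt day_of_week_expression_part
instance (day_of_week_expression_part : String) (out : String) : Decidable (Spec_decrease_days_of_week day_of_week_expression_part out) := by unfold Spec_decrease_days_of_week; infer_instance

-- ===== CLAIM (what is proved, stated in full; the proofs are below) =====
def Claim_equal_decrease_days_of_week : Prop := ∀ (day_of_week_expression_part : String), Dom_decrease_days_of_week day_of_week_expression_part → Spec_decrease_days_of_week day_of_week_expression_part (decrease_days_of_week day_of_week_expression_part)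

-- ===== LEMMAS AND PROOFS =====

-- per-character transform with the predecessor, and the predecessor-map both ports converge to
def pvDec (c : Char) : Char := pvTbl.getD c c

def pvG (p : Option Char) (c : Char) : Char :=
  if p == some '#' || p == some '/' then c else pvDec c

def pvMapG : Option Char → List Char → List Char
  | _, [] => []
  | p, c :: rest => pvG p c :: pvMapG (some c) rest

-- A's per-character transform when the guard is passed
def pvTrA (c : Char) : Char :=
  match PySem.Int.ofStr? (String.ofList [c]) with
  | some char_numeric => PySem.List.pyGetD (PySem.Int.toChars (char_numeric - 1)) 0 ' '
  | none => c

def pvAsciiChars : List Char := ['\t', '\n', '\r', ' ', '!', '"', '#', '$', '%', '&', '\'', '(', ')', '*', '+', ',', '-', '.', '/', '0', '1', '2', '3', '4', '5', '6', '7', '8', '9', ':', ';', '<', '=', '>', '?', '@', 'A', 'B', 'C', 'D', 'E', 'F', 'G', 'H', 'I', 'J', 'K', 'L', 'M', 'N', 'O', 'P', 'Q', 'R', 'S', 'T', 'U', 'V', 'W', 'X', 'Y', 'Z', '[', '\\', ']', '^', '_', '`', 'a', 'b', 'c', 'd', 'e', 'f', 'g', 'h', 'i', 'j', 'k', 'l',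 'm', 'n', 'o', 'p', 'q', 'r', 's', 't', 'u', 'v', 'w', 'x', 'y', 'z', '{', '|', '}', '~']

def pvAsciiNats : List Nat := [9, 10, 13, 32, 33, 34, 35, 36, 37, 38, 39, 40, 41, 42, 43, 44, 45, 46, 47, 48, 49, 50, 51, 52, 53, 54, 55, 56, 57, 58, 59, 60, 61, 62, 63, 64, 65, 66, 67, 68, 69, 70, 71, 72, 73, 74, 75, 76, 77, 78, 79, 80, 81, 82, 83, 84, 85, 86, 87, 88, 89, 90, 91, 92, 93, 94, 95, 96, 97, 98, 99, 100, 101, 102, 103, 104, 105, 106, 107, 108, 109, 110, 111, 112, 113, 114, 115, 116, 117, 118, 119, 120, 121, 122, 123, 124, 125, 126]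

lemma pvMapNats : pvAsciiChars.map Char.toNat = pvAsciiNats := by decide

lemma pvCharFactAll : pvAsciiChars.all (fun c =>
    (pvTrA c == pvDec c) &&
    ((pvDec c == '#' || pvDec c == '/') == (c == '#' || c == '/'))) := by decide

lemma pvChar_eq_of_toNat (c d : Char) (h : c.toNat = d.toNat) : c = d := by
  apply Char.ext
  exact UInt32.toNat_inj.mp h

lemma pvMem_of_toNat_mem : ∀ (l : List Char) (c : Char), c.toNat ∈ l.map Char.toNat → c ∈ l := by
  intro l
  induction l with
  | nil => intro c h; simp at h
  | cons d t ih =>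
      intro c h
      simp only [List.map_cons, List.mem_cons] at h ⊢
      rcases h with h | h
      · exact Or.inl (pvChar_eq_of_toNat c d h)
      · exact Or.inr (ih c h)

lemma pvMemDom (c : Char) (hc : pvDomChar c = true) : c ∈ pvAsciiChars := by
  apply pvMem_of_toNat_mem
  rw [pvMapNats]
  have : (((32 ≤ c.toNat ∧ c.toNat ≤ 126) ∨ c.toNat = 9) ∨ c.toNat = 10) ∨ c.toNat = 13 := by
    simpa [pvDomChar] using hc
  simp only [pvAsciiNats, List.mem_cons, List.not_mem_nil, or_false]
  omega

lemma pvCharFact (c : Char) (hc : pvDomChar c = true) :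
    pvTrA c = pvDec c ∧
    ((pvDec c == '#' || pvDec c == '/') = (c == '#' || c == '/')) := by
  have h := List.all_eq_true.mp pvCharFactAll c (pvMemDom c hc)
  simp only [Bool.and_eq_true, beq_iff_eq] at h
  exact h

lemma pvG_equiv (p : Option Char) (c : Char) (hc : pvDomChar c = true) :
    ((pvG p c == '#' || pvG p c == '/') = (c == '#' || c == '/')) := by
  unfold pvG
  split
  · rfl
  · exact (pvCharFact c hc).2

lemma pvSet_append_len {α : Type} (l₁ l₂ : List α) (x v : α) :
    (l₁ ++ x :: l₂).set l₁.length v = l₁ ++ v :: l₂ := by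
  induction l₁ with
  | nil => rfl
  | cons a t ih => simp [ih]

lemma pvGetD_append_len (l₁ l₂ : List Char) (m d : Char) :
    (l₁ ++ m :: l₂).getD l₁.length d = m := by
  induction l₁ with
  | nil => rfl
  | cons a t ih => simp only [List.cons_append, List.length_cons, List.getD_cons_succ]; exact ih

-- ===== A-side: the fold of A equals pvMapG =====
lemma pvStepA_true (done rest : List Char) (c : Char) (hc : pvDomChar c = true)
    (hg : (((done.length : Int) == 0) ||
        (PySem.List.pyGetD (done ++ c :: rest) ((done.length : Int) - 1) ' ' != '#' &&
         PySem.List.pyGetD (done ++ c :: rest) ((done.length : Int) - 1) ' ' != '/')) = true) :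
    pvStepA (done ++ c :: rest) ((done.length : Int), c) = done ++ (pvDec c) :: rest := by
  have hfact := (pvCharFact c hc).1
  unfold pvStepA
  simp only [hg, if_true]
  rcases hofs : PySem.Int.ofStr? (String.ofList [c]) with _ | n
  · have : pvTrA c = c := by simp [pvTrA, hofs]
    rw [← hfact, this]
  · have : pvTrA c = PySem.List.pyGetD (PySem.Int.toChars (n - 1)) 0 ' ' := by simp [pvTrA, hofs]
    rw [← hfact, this]
    simp only [PySem.List.pySetD_natCast]
    exact pvSet_append_len done rest c _

lemma pvStepA_eq (done rest : List Char) (c : Char) (hc : pvDomChar c = true) (p : Option Char)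
    (h1 : p = none → done = [])
    (h2 : ∀ q, p = some q → ∃ d' m, done = d' ++ [m] ∧
        ((m == '#' || m == '/') = (q == '#' || q == '/'))) :
    pvStepA (done ++ c :: rest) ((done.length : Int), c) = done ++ pvG p c :: rest := by
  cases p with
  | none =>
      have hd : done = [] := h1 rfl
      subst hd
      rw [pvStepA_true [] rest c hc (by simp)]
      unfold pvG
      simp
  | some q =>
      obtain ⟨d', m, hdm, hm⟩ := h2 q rfl
      subst hdm
      have hidx : (((d' ++ [m]).length : Int)) - 1 = (d'.length : Int) := by
        simp only [List.length_append, List.length_cons, List.length_nil]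
        push_cast
        omega
      have hget : PySem.List.pyGetD ((d' ++ [m]) ++ c :: rest) (((d' ++ [m]).length : Int) - 1) ' ' = m := by
        rw [hidx, PySem.List.pyGetD_natCast, List.append_assoc, List.singleton_append]
        exact pvGetD_append_len d' (c :: rest) m ' '
      by_cases hq : (q == '#' || q == '/') = true
      · have hm' : (m == '#' || m == '/') = true := by rw [hm]; exact hq
        have hcond : ((((d' ++ [m]).length : Int) == 0) ||
            (PySem.List.pyGetD ((d' ++ [m]) ++ c :: rest) (((d' ++ [m]).length : Int) - 1) ' ' != '#' &&
             PySem.List.pyGetD ((d' ++ [m]) ++ c :: rest) (((d' ++ [m]).length : Int) - 1) ' ' != '/')) = false := by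
          rw [hget]
          rcases Bool.or_eq_true_iff.mp hm' with h | h <;>
            (simp [h, bne, List.length_append]; omega)
        unfold pvStepA
        simp only [hcond, Bool.false_eq_true, if_false]
        have : pvG (some q) c = c := by
          unfold pvG
          simp [hq]
        rw [this]
      · have hqf : (q == '#' || q == '/') = false := by
          revert hq; cases (q == '#' || q == '/') <;> simp
        have hm' : (m == '#' || m == '/') = false := by rw [hm]; exact hqf
        have hmn : (m == '#') = false ∧ (m == '/') = false := by
          constructor <;> (revert hm'; cases (m == '#') <;> cases (m == '/') <;> simp)
        rw [pvStepA_true (d' ++ [m]) rest c hc (by rw [hget]; simp [bne, hmn.1, hmn.2])]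
        have : pvG (some q) c = pvDec c := by
          unfold pvG
          simp [hqf]
        rw [this]

lemma pvFoldA : ∀ (rest done : List Char) (p : Option Char),
    (∀ c ∈ rest, pvDomChar c = true) →
    (p = none → done = []) →
    (∀ q, p = some q → ∃ d' m, done = d' ++ [m] ∧
        ((m == '#' || m == '/') = (q == '#' || q == '/'))) →
    (PySem.List.enumerate rest (done.length : Int)).foldl pvStepA (done ++ rest)
      = done ++ pvMapG p rest := by
  intro rest
  induction rest with
  | nil =>
      intro done p _ _ _
      simp [PySem.List.enumerate_nil, pvMapG]
  | cons c rest ih =>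
      intro done p hdom h1 h2
      have hc : pvDomChar c = true := hdom c (List.mem_cons_self ..)
      rw [PySem.List.enumerate_cons, List.foldl_cons]
      rw [pvStepA_eq done rest c hc p h1 h2]
      have hre : done ++ pvG p c :: rest = (done ++ [pvG p c]) ++ rest := by
        simp
      have hlen : ((done.length : Int) + 1) = (((done ++ [pvG p c]).length : Int)) := by
        simp
      rw [hre, hlen]
      rw [ih (done ++ [pvG p c]) (some c) (fun x hx => hdom x (List.mem_cons_of_mem _ hx))
        (by intro h; cases h)
        (by
          intro q hq
          injection hq with hq'
          subst hq'
          exact ⟨done, pvG p c, rfl, pvG_equiv p c hc⟩)]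
      simp [pvMapG]

-- ===== B-side: translate-then-repair equals pvMapG =====
lemma pvMapG_length : ∀ (l : List Char) (p : Option Char), (pvMapG p l).length = l.length := by
  intro l
  induction l with
  | nil => intro p; rfl
  | cons c rest ih => intro p; simp [pvMapG, ih]

lemma pvMapG_snoc2 : ∀ (l : List Char) (p : Option Char) (c c' : Char),
    pvMapG p ((l ++ [c]) ++ [c']) = pvMapG p (l ++ [c]) ++ [pvG (some c) c'] := by
  intro l
  induction l with
  | nil => intro p c c'; rfl
  | cons a t ih =>
      intro p c c'
      simp only [List.cons_append, pvMapG, ih]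

lemma pvFoldB : ∀ (rest' done : List Char) (c : Char),
    (PySem.List.enumerate (c :: rest') (done.length : Int)).foldl
      (pvStepB (done ++ c :: rest')) (pvMapG none (done ++ [c]) ++ rest'.map pvDec)
      = pvMapG none (done ++ c :: rest') := by
  intro rest'
  induction rest' with
  | nil =>
      intro done c
      rw [PySem.List.enumerate_cons, PySem.List.enumerate_nil, List.foldl_cons, List.foldl_nil]
      unfold pvStepB
      simp [List.length_append]
  | cons c' rest'' ih =>
      intro done c
      rw [PySem.List.enumerate_cons, List.foldl_cons]
      have hstep : pvStepB (done ++ c :: c' :: rest'')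
          (pvMapG none (done ++ [c]) ++ (c' :: rest'').map pvDec) ((done.length : Int), c)
          = pvMapG none (done ++ [c] ++ [c']) ++ rest''.map pvDec := by
        unfold pvStepB
        have htrue : decide ((done.length : Int) + 1 < (((done ++ c :: c' :: rest'').length : Int))) = true := by
          simp only [List.length_append, List.length_cons, decide_eq_true_eq]
          push_cast
          omega
        by_cases hsep : (c == '#' || c == '/') = true
        · simp only [hsep, htrue, Bool.and_self, if_true]
          have hidx : (done.length : Int) + 1 = (((done ++ [c]).length : Nat) : Int) := by
            simp
          have hget : PySem.List.pyGetD (done ++ c :: c' :: rest'') ((done.length : Int) + 1) ' ' = c' := by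
            rw [hidx, PySem.List.pyGetD_natCast]
            have : done ++ c :: c' :: rest'' = (done ++ [c]) ++ c' :: rest'' := by simp
            rw [this]
            exact pvGetD_append_len (done ++ [c]) rest'' c' ' '
          rw [hget, hidx, PySem.List.pySetD_natCast]
          have hplen : (pvMapG none (done ++ [c])).length = (done ++ [c]).length := pvMapG_length _ _
          rw [List.map_cons, ← hplen, pvSet_append_len]
          rw [pvMapG_snoc2]
          have : pvG (some c) c' = c' := by unfold pvG; simp [hsep]
          simp [this]
        · have hsepf : (c == '#' || c == '/') = false := by
            revert hsep; cases (c == '#' || c == '/') <;> simp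
          simp only [hsepf, Bool.false_and, Bool.false_eq_true, if_false, List.map_cons]
          rw [pvMapG_snoc2]
          have : pvG (some c) c' = pvDec c' := by unfold pvG; simp [hsepf]
          simp [this]
      rw [hstep]
      have hlen : ((done.length : Int) + 1) = (((done ++ [c]).length : Int)) := by simp
      have hcs : done ++ c :: c' :: rest'' = (done ++ [c]) ++ c' :: rest'' := by simp
      rw [hlen, hcs, ih (done ++ [c]) c']

lemma pvAltEq (s : String) :
    decrease_days_of_week_alt s = String.ofList (pvMapG none s.toList) := by
  cases hs : s.toList with
  | nil => simp [decrease_days_of_week_alt, hs, PySem.List.enumerate_nil, pvMapG]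
  | cons c rest =>
      simp only [decrease_days_of_week_alt, hs]
      have h := pvFoldB rest [] c
      simp only [List.nil_append, List.length_nil, Nat.cast_zero] at h
      have hinit : (c :: rest).map (fun x => pvTbl.getD x x) = pvMapG none [c] ++ rest.map pvDec := by
        simp [pvMapG, pvG, pvDec]
      rw [hinit, h]

-- ===== VERDICT (by name: the statement is the Claim_ definition above) =====
theorem decrease_days_of_week_spec : Claim_equal_decrease_days_of_week := by
  intro s hdom
  unfold Spec_decrease_days_of_week
  rw [pvAltEq]
  simp only [decrease_days_of_week]
  have hdom' : ∀ c ∈ s.toList, pvDomChar c = true := by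
    have : pvDomStr s = true := hdom
    unfold pvDomStr at this
    exact List.all_eq_true.mp this
  have hA := pvFoldA s.toList [] none hdom' (fun _ => rfl) (by intro q h; cases h)
  simp only [List.length_nil, Nat.cast_zero, List.nil_append] at hA
  rw [hA]
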